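-- pv_equiv track=rewrite | github.com/dff652/ts-iteration-loop | src/utils/model_eval.py | _split_continuous_outliers
-- ===== SOURCE A (Python) =====
-- from typing import Dict, List, Optional, Tuple
--
-- def _split_continuous_outliers(outlier_indices: List[int], min_size: int = 1, gp: int = 1) -> List[List[int]]:
--     split_indices: List[List[int]] = []
--     current: List[int] = []
--     for idx in outlier_indices:
--         if not current or idx == current[-1] + gp:
--             current.append(idx)
--         else:
--             if len(current) >= min_size:
--                 split_indices.append(current)
--             current = [idx]
--     if len(current) >= min_size:
--         split_indices.append(current)
--     return split_indices
-- ===== SOURCE B (Python) =====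
-- from itertools import groupby
-- from typing import List
--
--
-- def _split_continuous_outliers(outlier_indices: List[int], min_size: int = 1, gp: int = 1) -> List[List[int]]:
--     # Key-based grouping: idx - i*gp is constant exactly across a consecutive run.
--     result: List[List[int]] = []
--     for _key, grp in groupby(enumerate(outlier_indices), key=lambda p: p[1] - p[0] * gp):
--         run = [idx for _i, idx in grp]
--         if len(run) >= min_size:
--             result.append(run)
--     return result
-- ===== Notes on version B (the rewrite author's own statement) =====
-- stated objective: idiomatic
-- what changed: Replaces A's stateful current-accumulator loop with an itertools.groupby pass keyed by idx - i*gp (constant per consecutive run), then filters groups by min_size.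
-- intended difference: On an empty outlier_indices with min_size <= 0, A flushes its empty accumulator and returns [[]]; B returns [], the intended value since an empty group is never a run. — e.g. on _split_continuous_outliers([], 0, 1): A returns [[]], B returns []
import Mathlib
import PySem

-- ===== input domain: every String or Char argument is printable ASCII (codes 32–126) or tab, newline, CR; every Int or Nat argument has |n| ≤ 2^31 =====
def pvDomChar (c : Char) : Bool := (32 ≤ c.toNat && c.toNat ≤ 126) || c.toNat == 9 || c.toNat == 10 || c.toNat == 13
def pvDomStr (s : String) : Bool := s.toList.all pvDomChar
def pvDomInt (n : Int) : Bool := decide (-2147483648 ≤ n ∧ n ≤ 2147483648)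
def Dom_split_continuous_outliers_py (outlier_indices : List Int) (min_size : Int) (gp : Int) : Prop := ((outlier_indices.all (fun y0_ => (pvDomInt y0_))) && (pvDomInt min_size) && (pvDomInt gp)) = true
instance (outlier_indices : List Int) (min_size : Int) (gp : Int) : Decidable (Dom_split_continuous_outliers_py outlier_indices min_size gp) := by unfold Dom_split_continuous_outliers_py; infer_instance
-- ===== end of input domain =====

-- B replaces A's stateful current-accumulator loop by a groupby pass keyed by idx - i*gp (constant per run), then filters by min_size; on [] with min_size<=0 A returns [[]], B the intended [].


-- ===== PORT A =====
def split_continuous_outliers_py (outlier_indices : List Int) (min_size : Int) (gp : Int) : List (List Int) :=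
  let st := outlier_indices.foldl
    (fun (st : List (List Int) × List Int) idx =>
      if st.2 = [] ∨ idx = st.2.getLast! + gp then (st.1, st.2 ++ [idx])
      else ((if min_size ≤ (st.2.length : Int) then st.1 ++ [st.2] else st.1), [idx]))
    ([], [])
  if min_size ≤ (st.2.length : Int) then st.1 ++ [st.2] else st.1

-- ===== PORT B =====
-- itertools.groupby: maximal blocks of consecutive elements with equal key
def pvGby {α : Type} (k : α → Int) : List α → List (List α)
  | [] => []
  | [p] => [[p]]
  | p :: q :: t =>
    if k p = k q then
      match pvGby k (q :: t) with
      | g :: r => (p :: g) :: r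
      | [] => [[p]]
    else [p] :: pvGby k (q :: t)

def split_continuous_outliers_py_alt (outlier_indices : List Int) (min_size : Int) (gp : Int) : List (List Int) :=
  (pvGby (fun p => p.2 - p.1 * gp) (PySem.List.enumerate outlier_indices)).foldl
    (fun res g =>
      let run := g.map Prod.snd
      if min_size ≤ (run.length : Int) then res ++ [run] else res) []

-- ===== PRECONDITION & SPEC =====
-- On empty outlier_indices with min_size ≤ 0, A flushes its empty accumulator and returns [[]];
-- B returns [], the intended value since an empty group is never a run.
def D_split_continuous_outliers_py (outlier_indices : List Int) (min_size : Int) (gp : Int) : Prop :=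
  outlier_indices = [] ∧ min_size ≤ 0
instance (outlier_indices : List Int) (min_size : Int) (gp : Int) : Decidable (D_split_continuous_outliers_py outlier_indices min_size gp) := by unfold D_split_continuous_outliers_py; infer_instance

def Spec_split_continuous_outliers_py (outlier_indices : List Int) (min_size : Int) (gp : Int) (out : List (List Int)) : Prop := ¬ D_split_continuous_outliers_py outlier_indices min_size gp → out = split_continuous_outliers_py_alt outlier_indices min_size gp
instance (outlier_indices : List Int) (min_size : Int) (gp : Int) (out : List (List Int)) : Decidable (Spec_split_continuous_outliers_py outlier_indices min_size gp out) := by unfold Spec_split_continuous_outliers_py; infer_instance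

def pvDiffWitness_split_continuous_outliers_py : List Int × Int × Int := ([], 0, 1)
def pvDiffWitnessOut_split_continuous_outliers_py : (List (List Int)) × (List (List Int)) := ([[]], [])

-- ===== CLAIM (what is proved, stated in full; the proofs are below) =====
def Claim_unchanged_split_continuous_outliers_py : Prop := ∀ (outlier_indices : List Int) (min_size : Int) (gp : Int), Dom_split_continuous_outliers_py outlier_indices min_size gp → Spec_split_continuous_outliers_py outlier_indices min_size gp (split_continuous_outliers_py outlier_indices min_size gp)
def Claim_changed_split_continuous_outliers_py : Prop := Dom_split_continuous_outliers_py (pvDiffWitness_split_continuous_outliers_py.1) (pvDiffWitness_split_continuous_outliers_py.2.1) (pvDiffWitness_split_continuous_outliers_py.2.2) ∧ D_split_continuous_outliers_py (pvDiffWitness_split_continuous_outliers_py.1) (pvDiffWitness_split_continuous_outliers_py.2.1) (pvDiffWitness_split_continuous_outliers_py.2.2) ∧ split_continuous_outliers_py (pvDiffWitness_split_continuous_outliers_py.1) (pvDiffWitness_split_continuous_outliers_py.2.1) (pvDiffWitness_split_continuous_outliers_py.2.2) = pvDiffWitnessOut_split_continuous_outliers_py.1 ∧ split_continuous_outliers_py_alt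 (pvDiffWitness_split_continuous_outliers_py.1) (pvDiffWitness_split_continuous_outliers_py.2.1) (pvDiffWitness_split_continuous_outliers_py.2.2) = pvDiffWitnessOut_split_continuous_outliers_py.2 ∧ pvDiffWitnessOut_split_continuous_outliers_py.1 ≠ pvDiffWitnessOut_split_continuous_outliers_py.2
def Claim_exact_split_continuous_outliers_py : Prop := ∀ (outlier_indices : List Int) (min_size : Int) (gp : Int), Dom_split_continuous_outliers_py outlier_indices min_size gp → D_split_continuous_outliers_py outlier_indices min_size gp → split_continuous_outliers_py outlier_indices min_size gp ≠ split_continuous_outliers_py_alt outlier_indices min_size gp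

-- ===== LEMMAS AND PROOFS =====

-- runs of gp-consecutive integers, by front recursion (common characterisation of both sides)
def pvChunks (gp : Int) : List Int → List (List Int)
  | [] => []
  | [x] => [[x]]
  | x :: y :: t =>
    if y = x + gp then
      match pvChunks gp (y :: t) with
      | g :: r => (x :: g) :: r
      | [] => [[x]]
    else [x] :: pvChunks gp (y :: t)

-- A's loop without the min_size filter, with the open run as accumulator
def pvMergeF (gp : Int) : List Int → List Int → List (List Int)
  | cur, [] => [cur]
  | cur, x :: t =>
    if x = cur.getLast! + gp then pvMergeF gp (cur ++ [x]) t
    else cur :: pvMergeF gp [x] t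

theorem pvChunks_shape (gp : Int) : ∀ (t : List Int) (x : Int),
    ∃ g r, pvChunks gp (x :: t) = (x :: g) :: r := by
  intro t
  induction t with
  | nil => intro x; exact ⟨[], [], rfl⟩
  | cons y t ih =>
    intro x
    obtain ⟨g, r, h⟩ := ih y
    by_cases hc : y = x + gp
    · exact ⟨y :: g, r, by simp only [pvChunks, if_pos hc, h]⟩
    · exact ⟨[], pvChunks gp (y :: t), by simp only [pvChunks, if_neg hc]⟩

theorem pvGby_shape {α : Type} (k : α → Int) : ∀ (l : List α) (p : α),
    ∃ g r, pvGby k (p :: l) = (p :: g) :: r := by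
  intro l
  induction l with
  | nil => intro p; exact ⟨[], [], rfl⟩
  | cons q t ih =>
    intro p
    obtain ⟨g, r, h⟩ := ih q
    by_cases hc : k p = k q
    · exact ⟨q :: g, r, by simp only [pvGby, if_pos hc, h]⟩
    · exact ⟨[], pvGby k (q :: t), by simp only [pvGby, if_neg hc]⟩

theorem pvGby_enum (gp : Int) : ∀ (xs : List Int) (n : Int),
    (pvGby (fun p => p.2 - p.1 * gp) (PySem.List.enumerate xs n)).map (List.map Prod.snd)
      = pvChunks gp xs := by
  intro xs
  induction xs with
  | nil => intro n; simp [PySem.List.enumerate_nil, pvGby, pvChunks]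
  | cons x xs ih =>
    intro n
    cases xs with
    | nil => simp [PySem.List.enumerate_cons, PySem.List.enumerate_nil, pvGby, pvChunks]
    | cons y t =>
      have hkey : ((x : Int) - n * gp = y - (n + 1) * gp) ↔ (y = x + gp) := by
        constructor <;> intro h <;> nlinarith [h]
      obtain ⟨g, r, hG⟩ := pvGby_shape (fun p : Int × Int => p.2 - p.1 * gp)
        (PySem.List.enumerate t (n + 1 + 1)) (n + 1, y)
      obtain ⟨g', r', hC⟩ := pvChunks_shape gp t y
      have ihn := ih (n + 1)
      rw [PySem.List.enumerate_cons, hG, hC] at ihn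
      simp only [List.map] at ihn
      have hg : g.map Prod.snd = g' := by
        have h1 := (List.cons.injEq _ _ _ _).mp ihn
        exact ((List.cons.injEq _ _ _ _).mp h1.1).2
      have hr : r.map (List.map Prod.snd) = r' := ((List.cons.injEq _ _ _ _).mp ihn).2
      by_cases hc : y = x + gp
      · rw [PySem.List.enumerate_cons, PySem.List.enumerate_cons]
        simp only [pvGby, pvChunks]
        rw [if_pos (hkey.mpr hc), if_pos hc, hG, hC]
        simp [hg, hr]
      · rw [PySem.List.enumerate_cons, PySem.List.enumerate_cons]
        simp only [pvGby, pvChunks]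
        rw [if_neg (fun hh => hc (hkey.mp hh)), if_neg hc]
        have ihn1 := ih (n + 1)
        rw [PySem.List.enumerate_cons] at ihn1
        simp only [List.map]
        rw [ihn1]

theorem pvGetLast!_concat (c : List Int) (x : Int) : (c ++ [x]).getLast! = x := by
  induction c with
  | nil => rfl
  | cons a c ih =>
    cases c with
    | nil => rfl
    | cons b c => exact ih

theorem pvMergeF_chunks (gp : Int) : ∀ (t : List Int) (x : Int) (c g : List Int) (r : List (List Int)),
    pvChunks gp (x :: t) = (x :: g) :: r → pvMergeF gp (c ++ [x]) t = (c ++ x :: g) :: r := by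
  intro t
  induction t with
  | nil =>
    intro x c g r h
    simp only [pvChunks] at h
    injection h with h1 h2
    injection h1 with _ h3
    rw [← h2, ← h3]
    rfl
  | cons y t ih =>
    intro x c g r h
    obtain ⟨g0, r0, hC⟩ := pvChunks_shape gp t y
    by_cases hc : y = x + gp
    · simp only [pvChunks, if_pos hc, hC] at h
      injection h with h1 h2
      injection h1 with _ h3
      simp only [pvMergeF, pvGetLast!_concat, if_pos hc]
      rw [ih y (c ++ [x]) g0 r0 hC, ← h3, ← h2]
      simp
    · simp only [pvChunks, if_neg hc] at h
      injection h with h1 h2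
      injection h1 with _ h3
      simp only [pvMergeF, pvGetLast!_concat, if_neg hc]
      have h4 := ih y [] g0 r0 hC
      simp only [List.nil_append] at h4
      rw [h4, ← h3, ← h2, hC]

theorem pvFoldA (min_size gp : Int) : ∀ (xs : List Int) (si : List (List Int)) (cur : List Int),
    cur ≠ [] →
    (if min_size ≤ (((xs.foldl
          (fun (st : List (List Int) × List Int) idx =>
            if st.2 = [] ∨ idx = st.2.getLast! + gp then (st.1, st.2 ++ [idx])
            else ((if min_size ≤ (st.2.length : Int) then st.1 ++ [st.2] else st.1), [idx]))
          (si, cur)).2.length : Int))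
      then (xs.foldl
          (fun (st : List (List Int) × List Int) idx =>
            if st.2 = [] ∨ idx = st.2.getLast! + gp then (st.1, st.2 ++ [idx])
            else ((if min_size ≤ (st.2.length : Int) then st.1 ++ [st.2] else st.1), [idx]))
          (si, cur)).1 ++ [(xs.foldl
          (fun (st : List (List Int) × List Int) idx =>
            if st.2 = [] ∨ idx = st.2.getLast! + gp then (st.1, st.2 ++ [idx])
            else ((if min_size ≤ (st.2.length : Int) then st.1 ++ [st.2] else st.1), [idx]))
          (si, cur)).2]
      else (xs.foldl
          (fun (st : List (List Int) × List Int) idx =>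
            if st.2 = [] ∨ idx = st.2.getLast! + gp then (st.1, st.2 ++ [idx])
            else ((if min_size ≤ (st.2.length : Int) then st.1 ++ [st.2] else st.1), [idx]))
          (si, cur)).1)
      = si ++ (pvMergeF gp cur xs).filter (fun r => min_size ≤ (r.length : Int)) := by
  intro xs
  induction xs with
  | nil =>
    intro si cur hc
    simp only [List.foldl_nil, pvMergeF, List.filter]
    split_ifs with h
    · simp [decide_eq_true h]
    · simp [decide_eq_false h]
  | cons x t ih =>
    intro si cur hc
    rw [List.foldl_cons]
    by_cases h : x = cur.getLast! + gp
    · have hs : (if (si, cur).2 = [] ∨ x = (si, cur).2.getLast! + gp then ((si, cur).1, (si, cur).2 ++ [x])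
            else ((if min_size ≤ (((si, cur).2.length : Int)) then (si, cur).1 ++ [(si, cur).2] else (si, cur).1), [x]))
          = (si, cur ++ [x]) := by rw [if_pos (Or.inr h)]
      rw [hs, ih si (cur ++ [x]) (by simp)]
      simp only [pvMergeF, if_pos h]
    · have hs : (if (si, cur).2 = [] ∨ x = (si, cur).2.getLast! + gp then ((si, cur).1, (si, cur).2 ++ [x])
            else ((if min_size ≤ (((si, cur).2.length : Int)) then (si, cur).1 ++ [(si, cur).2] else (si, cur).1), [x]))
          = ((if min_size ≤ (cur.length : Int) then si ++ [cur] else si), [x]) := by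
        rw [if_neg (fun hh => hh.elim (fun h1 => hc h1) (fun h2 => h h2))]
      rw [hs, ih _ [x] (by simp)]
      simp only [pvMergeF, if_neg h, List.filter]
      split_ifs with hcur
      · simp [decide_eq_true hcur]
      · simp [decide_eq_false hcur]

theorem pvMain (xs : List Int) (min_size gp : Int) (h : ¬ (xs = [] ∧ min_size ≤ 0)) :
    split_continuous_outliers_py xs min_size gp = split_continuous_outliers_py_alt xs min_size gp := by
  cases xs with
  | nil =>
    have hm : ¬ min_size ≤ 0 := fun hh => h ⟨rfl, hh⟩
    simp [split_continuous_outliers_py, split_continuous_outliers_py_alt,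
      PySem.List.enumerate_nil, pvGby, hm]
  | cons x t =>
    -- A side: first step opens the run [x], then pvFoldA + pvMergeF_chunks
    obtain ⟨g, r, hC⟩ := pvChunks_shape gp t x
    have hA : split_continuous_outliers_py (x :: t) min_size gp
        = (pvChunks gp (x :: t)).filter (fun r => min_size ≤ (r.length : Int)) := by
      show (if min_size ≤ ((((x :: t).foldl
            (fun (st : List (List Int) × List Int) idx =>
              if st.2 = [] ∨ idx = st.2.getLast! + gp then (st.1, st.2 ++ [idx])
              else ((if min_size ≤ (st.2.length : Int) then st.1 ++ [st.2] else st.1), [idx]))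
            ([], [])).2.length : Int))
        then ((x :: t).foldl
            (fun (st : List (List Int) × List Int) idx =>
              if st.2 = [] ∨ idx = st.2.getLast! + gp then (st.1, st.2 ++ [idx])
              else ((if min_size ≤ (st.2.length : Int) then st.1 ++ [st.2] else st.1), [idx]))
            ([], [])).1 ++ [((x :: t).foldl
            (fun (st : List (List Int) × List Int) idx =>
              if st.2 = [] ∨ idx = st.2.getLast! + gp then (st.1, st.2 ++ [idx])
              else ((if min_size ≤ (st.2.length : Int) then st.1 ++ [st.2] else st.1), [idx]))
            ([], [])).2]
        else ((x :: t).foldl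
            (fun (st : List (List Int) × List Int) idx =>
              if st.2 = [] ∨ idx = st.2.getLast! + gp then (st.1, st.2 ++ [idx])
              else ((if min_size ≤ (st.2.length : Int) then st.1 ++ [st.2] else st.1), [idx]))
            ([], [])).1)
        = (pvChunks gp (x :: t)).filter (fun r => min_size ≤ (r.length : Int))
      rw [List.foldl_cons]
      have hs : (if ((([] : List (List Int)), ([] : List Int)) : List (List Int) × List Int).2 = [] ∨ x = ((([] : List (List Int)), ([] : List Int)) : List (List Int) × List Int).2.getLast! + gp
              then (((([] : List (List Int)), ([] : List Int)) : List (List Int) × List Int).1, ((([] : List (List Int)), ([] : List Int)) : List (List Int) × List Int).2 ++ [x])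
              else ((if min_size ≤ ((((([] : List (List Int)), ([] : List Int)) : List (List Int) × List Int).2.length : Int)) then ((([] : List (List Int)), ([] : List Int)) : List (List Int) × List Int).1 ++ [((([] : List (List Int)), ([] : List Int)) : List (List Int) × List Int).2] else ((([] : List (List Int)), ([] : List Int)) : List (List Int) × List Int).1), [x]))
          = (([] : List (List Int)), [x]) := by rw [if_pos (Or.inl rfl)]; rfl
      rw [hs, pvFoldA min_size gp t [] [x] (by simp)]
      have h4 := pvMergeF_chunks gp t x [] g r hC
      simp only [List.nil_append] at h4
      rw [h4, hC, List.nil_append]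
    -- B side: fold-append = filter ∘ map, then pvGby_enum
    have hB : split_continuous_outliers_py_alt (x :: t) min_size gp
        = (pvChunks gp (x :: t)).filter (fun r => min_size ≤ (r.length : Int)) := by
      unfold split_continuous_outliers_py_alt
      rw [show (fun (res : List (List Int)) (g : List (Int × Int)) =>
            let run := g.map Prod.snd
            if min_size ≤ (run.length : Int) then res ++ [run] else res)
          = (fun (res : List (List Int)) (g : List (Int × Int)) =>
            if min_size ≤ (((g.map Prod.snd).length : Int)) then res ++ [g.map Prod.snd] else res) from rfl]
      rw [PySem.List.foldl_append_ite (fun g : List (Int × Int) => min_size ≤ ((g.map Prod.snd).length : Int))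
        (fun g : List (Int × Int) => g.map Prod.snd)]
      rw [List.nil_append]
      have hfm := List.filter_map (l := pvGby (fun p => p.2 - p.1 * gp) (PySem.List.enumerate (x :: t) 0))
        (f := fun g : List (Int × Int) => g.map Prod.snd)
        (p := fun r : List Int => decide (min_size ≤ (r.length : Int)))
      simp only [Function.comp_def] at hfm
      rw [show PySem.List.enumerate (x :: t) = PySem.List.enumerate (x :: t) 0 from rfl, ← hfm,
        pvGby_enum gp (x :: t) 0]
    rw [hA, hB]

-- ===== VERDICT (by name: the statement is the Claim_ definition above) =====
theorem split_continuous_outliers_py_spec : Claim_unchanged_split_continuous_outliers_py := by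
  intro xs m gp _ hD
  exact pvMain xs m gp hD

theorem split_continuous_outliers_py_changed : Claim_changed_split_continuous_outliers_py := by
  unfold Claim_changed_split_continuous_outliers_py; decide

theorem split_continuous_outliers_py_tight : Claim_exact_split_continuous_outliers_py := by
  intro xs m gp _ hD
  obtain ⟨hxs, hm⟩ := hD
  subst hxs
  simp [split_continuous_outliers_py, split_continuous_outliers_py_alt,
    PySem.List.enumerate_nil, pvGby, hm]
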